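-- pv_equiv track=rewrite | github.com/aerospaceresearch/tiqs | tiqs.py | gap_period_counter
-- ===== SOURCE A (Python) =====
-- def gap_period_counter(x):
--     gap_start = []
--     gap_period = []
--     for i in range(1,len(x)):
--         if x[i-1] < x[i]:
--             gap_start.append(i)
--
--     for i in range(1,len(gap_start)):
--         gap_period.append(gap_start[i] - gap_start[i-1])
--     return gap_period
-- ===== SOURCE B (Python) =====
-- def gap_period_counter(x):
--     gap_period = []
--     prev = None
--     for i in range(1, len(x)):
--         if x[i-1] < x[i]:
--             if prev is not None:
--                 gap_period.append(i - prev)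
--             prev = i
--     return gap_period
-- ===== Notes on version B (the rewrite author's own statement) =====
-- stated objective: simpler
-- what changed: Single streaming pass that emits each gap as soon as the next increase index is seen (tracking only the previous increase index), instead of materialising the full list of increase indices and differencing it in a second loop.
import Mathlib
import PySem

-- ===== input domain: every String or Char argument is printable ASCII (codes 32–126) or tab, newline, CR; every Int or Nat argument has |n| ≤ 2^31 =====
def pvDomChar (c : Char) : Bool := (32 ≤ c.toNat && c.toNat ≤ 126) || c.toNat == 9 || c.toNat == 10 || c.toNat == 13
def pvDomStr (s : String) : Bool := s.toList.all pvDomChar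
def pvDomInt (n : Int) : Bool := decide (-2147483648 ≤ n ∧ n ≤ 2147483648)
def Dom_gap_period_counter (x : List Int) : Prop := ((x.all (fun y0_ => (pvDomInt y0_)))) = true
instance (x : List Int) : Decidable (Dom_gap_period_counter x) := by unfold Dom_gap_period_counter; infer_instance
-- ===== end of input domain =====

-- B replaces A's two passes (collect all increase indices, then difference them) by one
-- streaming pass that remembers only the previous increase index; objective: simpler.

-- ===== PORT A =====
def gap_period_counter (x : List Int) : List Int :=
  let gap_start : List Int :=
    (PySem.List.pyRange 1 (x.length : Int) 1).foldl
      (fun acc i =>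
        if PySem.List.pyGetD x (i - 1) 0 < PySem.List.pyGetD x i 0 then acc ++ [i] else acc) []
  (PySem.List.pyRange 1 (gap_start.length : Int) 1).foldl
    (fun acc i => acc ++ [PySem.List.pyGetD gap_start i 0 - PySem.List.pyGetD gap_start (i - 1) 0]) []

-- ===== PORT B =====
-- one loop step of B: state = (prev : Option Int, gap_period so far)
def gapStepB (x : List Int) (s : Option Int × List Int) (i : Int) : Option Int × List Int :=
  if PySem.List.pyGetD x (i - 1) 0 < PySem.List.pyGetD x i 0 then
    (some i,
     match s.1 with
     | some j => s.2 ++ [i - j]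
     | none => s.2)
  else s

def gap_period_counter_alt (x : List Int) : List Int :=
  ((PySem.List.pyRange 1 (x.length : Int) 1).foldl (gapStepB x) (none, [])).2

-- ===== PRECONDITION & SPEC =====
def Spec_gap_period_counter (x : List Int) (out : List Int) : Prop := out = gap_period_counter_alt x
instance (x : List Int) (out : List Int) : Decidable (Spec_gap_period_counter x out) := by unfold Spec_gap_period_counter; infer_instance

-- ===== CLAIM (what is proved, stated in full; the proofs are below) =====
def Claim_equal_gap_period_counter : Prop := ∀ (x : List Int), Dom_gap_period_counter x → Spec_gap_period_counter x (gap_period_counter x)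

-- ===== LEMMAS AND PROOFS =====

-- successive differences of a list, seeded with an optional previous element
def pvDiffFrom : Option Int → List Int → List Int
  | _, [] => []
  | none, a :: t => pvDiffFrom (some a) t
  | some j, a :: t => (a - j) :: pvDiffFrom (some a) t

-- last element of the list, defaulting to the seed
def pvLastO : Option Int → List Int → Option Int
  | prev, [] => prev
  | _, a :: t => pvLastO (some a) t

theorem gapStepB_foldl (x l : List Int) (prev : Option Int) (acc : List Int) :
    l.foldl (gapStepB x) (prev, acc) =
      (pvLastO prev (l.filter (fun i => decide (PySem.List.pyGetD x (i - 1) 0 < PySem.List.pyGetD x i 0))),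
       acc ++ pvDiffFrom prev (l.filter (fun i => decide (PySem.List.pyGetD x (i - 1) 0 < PySem.List.pyGetD x i 0)))) := by
  induction l generalizing prev acc with
  | nil => simp [pvLastO, pvDiffFrom]
  | cons a t ih =>
    by_cases h : PySem.List.pyGetD x (a - 1) 0 < PySem.List.pyGetD x a 0
    · cases prev with
      | none => simp [List.foldl, gapStepB, h, ih, pvLastO, pvDiffFrom]
      | some j => simp [List.foldl, gapStepB, h, ih, pvLastO, pvDiffFrom]
    · simp [List.foldl, gapStepB, h, ih]

theorem pvDiffFrom_zip (j : Int) (g : List Int) :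
    pvDiffFrom (some j) g = List.zipWith (fun p c => c - p) (j :: g) g := by
  induction g generalizing j with
  | nil => rfl
  | cons a t ih => simp [pvDiffFrom, ih]

theorem secondLoop_eq (g : List Int) :
    (PySem.List.pyRange 1 (g.length : Int) 1).foldl
      (fun acc i => acc ++ [PySem.List.pyGetD g i 0 - PySem.List.pyGetD g (i - 1) 0]) [] =
    pvDiffFrom none g := by
  rw [PySem.List.foldl_append_singleton_eq_map, List.nil_append]
  cases g with
  | nil => simp [pvDiffFrom, PySem.List.pyRange_one_eq_nil]
  | cons h t =>
    rw [show pvDiffFrom none (h :: t) = pvDiffFrom (some h) t from rfl, pvDiffFrom_zip]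
    apply List.ext_getElem
    · simp [PySem.List.length_pyRange_one]
    · intro k h1 h2
      simp only [List.getElem_map, PySem.List.getElem_pyRange_one, List.getElem_zipWith]
      have hk : k < t.length := by
        simp at h2 ⊢; omega
      have e1 : (1 : Int) + (k : Int) = ((k + 1 : Nat) : Int) := by push_cast; ring
      have e2 : ((k + 1 : Nat) : Int) - 1 = ((k : Nat) : Int) := by push_cast; ring
      rw [e1, PySem.List.pyGetD_eq_getElem _ _ (by positivity) (by simp; omega)]
      rw [e2, PySem.List.pyGetD_eq_getElem _ _ (by positivity) (by simp; omega)]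
      simp [List.getElem_cons_succ]

-- ===== VERDICT (by name: the statement is the Claim_ definition above) =====
theorem gap_period_counter_spec : Claim_equal_gap_period_counter := by
  intro x _
  unfold Spec_gap_period_counter gap_period_counter gap_period_counter_alt
  rw [gapStepB_foldl, PySem.List.foldl_append_ite_eq_filter, List.nil_append, secondLoop_eq]
  simp
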